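-- pv_equiv track=rewrite | github.com/mrMarkGaruda/Componentary | docker/bitnet-ai/app.py | _clean_response_strict
-- ===== SOURCE A (Python) =====
-- def _clean_response_strict(response: str) -> str:
--     """Strictly clean and format the AI response"""
--     if not response:
--         return ""
--
--     # Remove any unwanted tokens or artifacts
--     response = response.strip()
--
--     # Remove any incomplete sentences or weird artifacts
--     lines = response.split('\n')
--     cleaned_lines = []
--
--     for line in lines:
--         line = line.strip()
--         if line and not line.startswith(('Customer:', 'User:', 'Human:')):
--             # Stop at any role indicators that might leak through
--             if ':' in line and any(role in line.lower() for role in ['customer', 'user', 'human', 'assistant']):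
--                 break
--             cleaned_lines.append(line)
--
--     response = ' '.join(cleaned_lines).strip()
--
--     # Ensure it's a complete sentence
--     if response:
--         # Take only the first complete sentence or two
--         sentences = []
--         current_sentence = ""
--
--         for char in response:
--             current_sentence += char
--             if char in '.!?':
--                 sentences.append(current_sentence.strip())
--                 current_sentence = ""
--                 if len(sentences) >= 2:  # Max 2 sentences
--                     break
--
--         # If we have incomplete sentence, add it if it's substantial
--         if current_sentence.strip() and len(current_sentence.strip()) > 10:
--             sentences.append(current_sentence.strip() + '.')
--
--         response = ' '.join(sentences)
--
--     # Final length check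
--     if len(response) > 200:
--         response = response[:200].rsplit(' ', 1)[0] + '.'
--
--     return response
-- ===== SOURCE B (Python) =====
-- def _clean_response_strict(response: str) -> str:
--     """Strictly clean and format the AI response"""
--     if not response:
--         return ""
--
--     # Pipeline: strip lines, filter noise, cut at the first leaked role marker
--     stripped = [ln.strip() for ln in response.strip().split('\n')]
--     kept = [ln for ln in stripped
--             if ln and not ln.startswith(('Customer:', 'User:', 'Human:'))]
--     cleaned = []
--     for ln in kept:
--         if ':' in ln and any(r in ln.lower() for r in ['customer', 'user', 'human', 'assistant']):
--             break
--         cleaned.append(ln)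
--
--     text = ' '.join(cleaned).strip()
--
--     if text:
--         # Split off up to two sentences by jumping to each terminator
--         parts = []
--         rest = text
--         while len(parts) < 2:
--             cut = min((i for i, c in enumerate(rest) if c in '.!?'), default=-1)
--             if cut == -1:
--                 break
--             parts.append(rest[:cut + 1].strip())
--             rest = rest[cut + 1:]
--         if len(parts) < 2:
--             tail = rest.strip()
--             if len(tail) > 10:
--                 parts.append(tail + '.')
--         text = ' '.join(parts)
--
--     if len(text) > 200:
--         t = text[:200]
--         i = t.rfind(' ')
--         text = (t[:i] if i != -1 else t) + '.'
--
--     return text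
-- ===== Notes on version B (the rewrite author's own statement) =====
-- stated objective: alternative
-- what changed: A's fused per-line loop (strip+filter+break interleaved) becomes a strip/filter pipeline cut at the first role-marker line, and A's char-by-char sentence accumulator becomes jump-to-terminator slicing (find first '.!?' index, slice, repeat at most twice); the final truncation uses rfind instead of rsplit.
import Mathlib
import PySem

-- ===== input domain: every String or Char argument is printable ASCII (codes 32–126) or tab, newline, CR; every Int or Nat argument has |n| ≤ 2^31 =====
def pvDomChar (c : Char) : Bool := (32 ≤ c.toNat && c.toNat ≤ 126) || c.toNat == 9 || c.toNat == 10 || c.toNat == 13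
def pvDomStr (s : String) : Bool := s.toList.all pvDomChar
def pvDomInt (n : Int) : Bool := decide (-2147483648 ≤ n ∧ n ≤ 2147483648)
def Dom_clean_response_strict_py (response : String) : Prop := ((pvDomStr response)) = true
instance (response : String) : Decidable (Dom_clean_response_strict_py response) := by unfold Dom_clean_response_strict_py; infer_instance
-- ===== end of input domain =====

-- B replaces A's fused filter loop by a strip/filter pipeline with a cut, and A's
-- char-by-char sentence accumulator by jump-to-terminator slicing (objective: alternative).

-- helpers whose Python text is IDENTICAL in Source A and Source B (shared by both ports)
-- char in '.!?'
def isTermCh (c : Char) : Bool := ['.', '!', '?'].contains c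
-- ':' in line and any(role in line.lower() for role in ['customer','user','human','assistant'])
def lineTrigger (line : List Char) : Bool :=
  PySem.Chars.isIn [':'] line &&
    (PySem.Chars.isIn "customer".toList (PySem.Chars.lower line) ||
     PySem.Chars.isIn "user".toList (PySem.Chars.lower line) ||
     PySem.Chars.isIn "human".toList (PySem.Chars.lower line) ||
     PySem.Chars.isIn "assistant".toList (PySem.Chars.lower line))
-- line and not line.startswith(('Customer:', 'User:', 'Human:'))
def lineKeep (line : List Char) : Bool :=
  !line.isEmpty &&
    !(PySem.Chars.startswith line "Customer:".toList ||
      PySem.Chars.startswith line "User:".toList ||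
      PySem.Chars.startswith line "Human:".toList)

-- ===== PORT A =====
-- for line in lines: line = line.strip(); if …: if …: break; cleaned_lines.append(line)
def aLines : List (List Char) → List (List Char)
  | [] => []
  | l :: rest =>
    let line := PySem.Chars.strip l
    if lineKeep line then
      if lineTrigger line then []
      else line :: aLines rest
    else aLines rest

-- for char in response: current_sentence += char; if char in '.!?': …; break at 2
def aSent : List Char → List (List Char) → List Char → List (List Char) × List Char
  | [], sents, cur => (sents, cur)
  | c :: rest, sents, cur =>
    let cur' := cur ++ [c]
    if isTermCh c then
      let sents' := sents ++ [PySem.Chars.strip cur']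
      if 2 ≤ sents'.length then (sents', [])
      else aSent rest sents' []
    else aSent rest sents cur'

-- t.rsplit(' ', 1), ported by hand (exact for sep = ' ', maxsplit = 1)
def pyRsplit1Space (t : List Char) : List (List Char) :=
  let i := PySem.Chars.rfind t [' ']
  if i = -1 then [t] else [t.take i.toNat, t.drop (i.toNat + 1)]

def clean_response_strict_py (response : String) : String :=
  let cs0 := response.toList
  if cs0 = [] then "" else
  let cs := PySem.Chars.strip cs0
  let lines := PySem.Chars.splitOn cs ['\n']
  let cleaned := aLines lines
  let r := PySem.Chars.strip (PySem.Chars.join [' '] cleaned)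
  let r2 :=
    if r = [] then r
    else
      let p := aSent r [] []
      let cur := PySem.Chars.strip p.2
      let sents := if cur ≠ [] ∧ 10 < cur.length then p.1 ++ [cur ++ ['.']] else p.1
      PySem.Chars.join [' '] sents
  let out := if 200 < r2.length then ((pyRsplit1Space (r2.take 200)).headD []) ++ ['.'] else r2
  String.ofList out

-- ===== PORT B =====
-- for ln in kept: if trigger: break; cleaned.append(ln)
def bCut : List (List Char) → List (List Char)
  | [] => []
  | l :: rest => if lineTrigger l then [] else l :: bCut rest

-- while len(parts) < 2: cut = first terminator index (-1 if none); slice it off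
def bSents : List Char → Nat → List (List Char) × List Char
  | rest, 0 => ([], rest)
  | rest, k+1 =>
    match List.findIdx? isTermCh rest with
    | none => ([], rest)
    | some i =>
      let pr := bSents (rest.drop (i+1)) k
      (PySem.Chars.strip (rest.take (i+1)) :: pr.1, pr.2)

def clean_response_strict_py_alt (response : String) : String :=
  let cs0 := response.toList
  if cs0 = [] then "" else
  let kept := ((PySem.Chars.splitOn (PySem.Chars.strip cs0) ['\n']).map PySem.Chars.strip).filter lineKeep
  let cleaned := bCut kept
  let text := PySem.Chars.strip (PySem.Chars.join [' '] cleaned)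
  let t2 :=
    if text = [] then text
    else
      let pr := bSents text 2
      let parts :=
        if pr.1.length < 2 then
          let tail := PySem.Chars.strip pr.2
          if 10 < tail.length then pr.1 ++ [tail ++ ['.']] else pr.1
        else pr.1
      PySem.Chars.join [' '] parts
  let out :=
    if 200 < t2.length then
      let t := t2.take 200
      let i := PySem.Chars.rfind t [' ']
      (if i = -1 then t else t.take i.toNat) ++ ['.']
    else t2
  String.ofList out

-- ===== PRECONDITION & SPEC =====
def Spec_clean_response_strict_py (response : String) (out : String) : Prop := out = clean_response_strict_py_alt response
instance (response : String) (out : String) : Decidable (Spec_clean_response_strict_py response out) := by unfold Spec_clean_response_strict_py; infer_instance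

-- ===== CLAIM (what is proved, stated in full; the proofs are below) =====
def Claim_equal_clean_response_strict_py : Prop := ∀ (response : String), Dom_clean_response_strict_py response → Spec_clean_response_strict_py response (clean_response_strict_py response)

-- ===== LEMMAS AND PROOFS =====

-- phase 1: A's fused loop = strip/filter pipeline, then cut at the first trigger line
theorem aLines_eq (ls : List (List Char)) :
    aLines ls = bCut ((ls.map PySem.Chars.strip).filter lineKeep) := by
  induction ls with
  | nil => rfl
  | cons l rest ih =>
    simp only [aLines, List.map_cons, List.filter_cons]
    by_cases hk : lineKeep (PySem.Chars.strip l)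
    · simp [hk, bCut, ih]
    · simp [hk, ih]

-- key lemma: A's char loop jumps straight to the first terminator
theorem aSent_jump (cs : List Char) : ∀ (cur : List Char) (sents : List (List Char)),
    aSent cs sents cur =
      match List.findIdx? isTermCh cs with
      | none => (sents, cur ++ cs)
      | some i =>
        let sents' := sents ++ [PySem.Chars.strip (cur ++ cs.take (i+1))]
        if 2 ≤ sents'.length then (sents', [])
        else aSent (cs.drop (i+1)) sents' [] := by
  induction cs with
  | nil => intro cur sents; simp [aSent]
  | cons c rest ih =>
    intro cur sents
    by_cases hc : isTermCh c
    · simp [aSent, hc, List.findIdx?_cons]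
    · rw [show aSent (c :: rest) sents cur = aSent rest sents (cur ++ [c]) by
        simp [aSent, hc]]
      rw [ih (cur ++ [c]) sents]
      simp only [List.findIdx?_cons, hc]
      cases h : List.findIdx? isTermCh rest with
      | none => simp
      | some i => simp [List.take_succ_cons, List.drop_succ_cons, List.append_assoc]

-- phase 2: A's accumulator = B's jump-to-terminator splitter (leftover differs only
-- when two sentences were taken, where A resets it to [])
theorem aSent_eq_bSents (r : List Char) :
    aSent r [] [] =
      ((bSents r 2).1, if (bSents r 2).1.length < 2 then (bSents r 2).2 else []) := by
  rw [aSent_jump r [] []]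
  simp only [bSents]
  cases h1 : List.findIdx? isTermCh r with
  | none => simp
  | some i =>
    simp only [List.nil_append, List.length_cons, List.length_nil]
    rw [aSent_jump (r.drop (i+1)) [] _]
    cases h2 : List.findIdx? isTermCh (r.drop (i+1)) with
    | none => simp
    | some j => simp

theorem rsplitHead_eq (t : List Char) :
    (pyRsplit1Space t).headD [] =
      (if PySem.Chars.rfind t [' '] = -1 then t
       else t.take (PySem.Chars.rfind t [' ']).toNat) := by
  simp only [pyRsplit1Space]
  split <;> rfl

theorem strip_nil : PySem.Chars.strip ([] : List Char) = [] := by decide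

-- ===== VERDICT (by name: the statement is the Claim_ definition above) =====
set_option maxHeartbeats 1000000 in
theorem clean_response_strict_py_spec : Claim_equal_clean_response_strict_py := by
  intro response _
  unfold Spec_clean_response_strict_py clean_response_strict_py clean_response_strict_py_alt
  by_cases h0 : response.toList = []
  · simp [h0]
  · simp only [h0, aLines_eq]
    set text := PySem.Chars.strip (PySem.Chars.join [' ']
      (bCut (((PySem.Chars.splitOn (PySem.Chars.strip response.toList) ['\n']).map
        PySem.Chars.strip).filter lineKeep))) with htext
    by_cases ht : text = []
    · rw [ht]; norm_num
    · simp only [ht, aSent_eq_bSents]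
      set P := (bSents text 2).1
      set R := (bSents text 2).2
      have hparts :
          (if PySem.Chars.strip (if P.length < 2 then R else []) ≠ [] ∧
              10 < (PySem.Chars.strip (if P.length < 2 then R else [])).length
           then P ++ [PySem.Chars.strip (if P.length < 2 then R else []) ++ ['.']] else P) =
          (if P.length < 2 then
            if 10 < (PySem.Chars.strip R).length
            then P ++ [PySem.Chars.strip R ++ ['.']] else P
           else P) := by
        by_cases hl : P.length < 2
        · simp only [if_pos hl]
          by_cases h10 : 10 < (PySem.Chars.strip R).length
          · have hne : PySem.Chars.strip R ≠ [] := by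
              intro he; rw [he] at h10; simp at h10
            simp [h10, hne]
          · simp [h10]
        · simp [hl, strip_nil]
      rw [hparts, rsplitHead_eq]
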